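-- pv_equiv track=rewrite | github.com/lavonnehoang/CirclesCountry | eclipse-workspace/APT7/PositiveID.py | maximumFacts
-- ===== SOURCE A (Python) =====
-- def maximumFacts(suspects):
--     d = []
--     best = 0
--     for suspect in suspects:
--         x = suspect.split(",")
--         d.append(x)
--
--     for x in range(len(d)):
--         for y in range(x+1,len(d)):
--             same = list(set(d[x]) & set(d[y]))
--             if len(same) > best:
--                 best = len(same)
--     return best
-- ===== SOURCE B (Python) =====
-- def maximumFacts(suspects):
--     # inverted index: fact -> indices of the suspects holding it (increasing, no duplicates)
--     owners = {}
--     for i, suspect in enumerate(suspects):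
--         for fact in dict.fromkeys(suspect.split(",")):
--             owners.setdefault(fact, []).append(i)
--     # for every unordered pair of suspects, count the facts they share
--     shared = {}
--     for idx in owners.values():
--         for a, i in enumerate(idx):
--             for j in idx[a + 1:]:
--                 shared[(i, j)] = shared.get((i, j), 0) + 1
--     return max(shared.values(), default=0)
-- ===== Notes on version B (the rewrite author's own statement) =====
-- stated objective: alternative
-- what changed: Replaces A's all-pairs loop with a set intersection per pair by an inverted fact-to-suspect-indices index whose per-fact owner pairs are tallied in a (i,j)-keyed counter dict; the answer is the max tally.
import Mathlib
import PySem

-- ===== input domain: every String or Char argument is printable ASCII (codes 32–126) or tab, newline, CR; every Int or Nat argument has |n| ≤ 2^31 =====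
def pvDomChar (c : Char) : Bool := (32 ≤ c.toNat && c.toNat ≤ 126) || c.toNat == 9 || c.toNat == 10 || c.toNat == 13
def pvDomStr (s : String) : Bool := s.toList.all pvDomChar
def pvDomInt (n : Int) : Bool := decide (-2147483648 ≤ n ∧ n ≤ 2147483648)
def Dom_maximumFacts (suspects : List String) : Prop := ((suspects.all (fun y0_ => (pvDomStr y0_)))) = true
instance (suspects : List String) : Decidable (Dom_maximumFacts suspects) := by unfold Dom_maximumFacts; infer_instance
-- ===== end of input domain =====

-- B replaces A's all-pairs set intersections by an inverted fact→suspects index whose per-fact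
-- owner pairs are counted in a dictionary (objective: alternative decomposition).

-- ===== PORT A =====
-- '.split(",")' has a nonempty separator, so Python never raises: split? is always some, '.getD []' is exact.
def maximumFacts (suspects : List String) : Int :=
  let d : List (List String) :=
    suspects.foldl (fun acc suspect => acc ++ [(PySem.Str.split? suspect ",").getD []]) []
  (PySem.List.pyRange 0 (d.length : Int) 1).foldl (fun best x =>
    (PySem.List.pyRange (x + 1) (d.length : Int) 1).foldl (fun best y =>
      let same : List String :=
        PySem.Set.inter (PySem.Set.ofList (PySem.List.pyGetD d x []))
                        (PySem.Set.ofList (PySem.List.pyGetD d y []))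
      if ((same.length : Int)) > best then (same.length : Int) else best) best) 0

-- ===== PORT B =====
-- 'dict.fromkeys(..)' is PySem.List.dedup; 'setdefault(f, []).append(i)' is Dict.modify f [] (· ++ [i]);
-- 'idx[a+1:]' is PySem.List.slice; 'max(values, default=0)' is PySem.List.maxD.
def maximumFacts_alt (suspects : List String) : Int :=
  let owners : PySem.Dict String (List Int) :=
    (PySem.List.enumerate suspects).foldl (fun d p =>
      (PySem.List.dedup ((PySem.Str.split? p.2 ",").getD [])).foldl
        (fun d fact => d.modify fact [] (fun v => v ++ [p.1])) d) PySem.Dict.empty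
  let shared : PySem.Dict (Int × Int) Int :=
    owners.values.foldl (fun sh idx =>
      (PySem.List.enumerate idx).foldl (fun sh ai =>
        (PySem.List.slice idx (some (ai.1 + 1)) none).foldl (fun sh j =>
          sh.insert (ai.2, j) (sh.getD (ai.2, j) 0 + 1)) sh) sh) PySem.Dict.empty
  PySem.List.maxD shared.values (fun v => v) 0

-- ===== PRECONDITION & SPEC =====
def Spec_maximumFacts (suspects : List String) (out : Int) : Prop := out = maximumFacts_alt suspects
instance (suspects : List String) (out : Int) : Decidable (Spec_maximumFacts suspects out) := by unfold Spec_maximumFacts; infer_instance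

-- ===== CLAIM (what is proved, stated in full; the proofs are below) =====
def Claim_equal_maximumFacts : Prop := ∀ (suspects : List String), Dom_maximumFacts suspects → Spec_maximumFacts suspects (maximumFacts suspects)

-- ===== LEMMAS AND PROOFS =====

def pvPairs : List Int → List (Int × Int)
  | [] => []
  | x :: t => t.map (fun j => (x, j)) ++ pvPairs t

theorem pv_pairs_count (idx : List Int) (h : idx.Pairwise (· < ·)) (i j : Int) :
    (pvPairs idx).count (i, j) = if i ∈ idx ∧ j ∈ idx ∧ i < j then 1 else 0 := by
  induction idx with
  | nil => simp [pvPairs]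
  | cons x t ih =>
    rcases List.pairwise_cons.mp h with ⟨hx, ht⟩
    have hxt : x ∉ t := fun hm => absurd (hx x hm) (lt_irrefl x)
    have hcmap : (t.map (fun j' => (x, j'))).count (i, j) = if i = x ∧ j ∈ t then 1 else 0 := by
      have h1 : (t.map (fun j' => (x, j'))).count (i, j)
          = t.countP (fun j' => (x, j') == (i, j)) := by
        rw [List.count, List.countP_map]; rfl
      rw [h1]
      by_cases hix : i = x
      · subst hix
        have h2 : t.countP (fun j' => (i, j') == (i, j)) = t.count j := by
          rw [List.count]; apply List.countP_congr; intro a _; simp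
        rw [h2]
        by_cases hjt : j ∈ t
        · have hnd : t.Nodup := ht.imp (fun hab => ne_of_lt hab)
          simp [hjt, List.count_eq_one_of_mem hnd hjt]
        · simp [hjt, List.count_eq_zero_of_not_mem hjt]
      · have h2 : t.countP (fun j' => (x, j') == (i, j)) = 0 := by
          apply List.countP_eq_zero.mpr; intro a _; simp; intro hxi; exact absurd hxi.symm hix
        rw [h2, if_neg (fun hc => hix hc.1)]
    rw [pvPairs, List.count_append, hcmap, ih ht]
    simp only [List.mem_cons]
    by_cases hix : i = x
    · have hit : i ∉ t := by rw [hix]; exact hxt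
      have hltx : ∀ z, x < z ↔ i < z := by intro z; rw [hix]
      by_cases hjt : j ∈ t
      · have hlt : x < j := hx j hjt
        simp [hix, hjt, hit, hxt, hlt]
      · by_cases hjx : j = x
        · have hnlt : ¬ x < j := by rw [hjx]; exact lt_irrefl x
          simp [hix, hjx, hjt, hit, hxt, hnlt]
        · simp [hix, hjx, hjt, hit, hxt]
    · by_cases hjx : j = x
      · have hjt : j ∉ t := by rw [hjx]; exact hxt
        have hni : ¬ (i ∈ t ∧ i < j) := by
          rintro ⟨h1, h2⟩; have := hx i h1; rw [hjx] at h2; omega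
        rw [if_neg (fun hc => hix hc.1), if_neg (fun hc => hjt hc.2.1),
           if_neg (fun hc => hc.1.elim hix (fun h1 => hni ⟨h1, hc.2.2⟩))]
      · simp [hix, hjx]

theorem pv_mem_pairs (idx : List Int) (h : idx.Pairwise (· < ·)) (i j : Int) :
    (i, j) ∈ pvPairs idx ↔ i ∈ idx ∧ j ∈ idx ∧ i < j := by
  rw [← List.count_pos_iff, pv_pairs_count idx h i j]
  split_ifs with hc <;> simp [hc]

theorem pv_kf (idx pre : List Int) :
    (PySem.List.enumerate idx (pre.length : Int)).flatMap
      (fun ai => (PySem.List.slice (pre ++ idx) (some (ai.1 + 1)) none).map (fun j => (ai.2, j)))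
      = pvPairs idx := by
  induction idx generalizing pre with
  | nil => simp [PySem.List.enumerate, pvPairs]
  | cons x t ih =>
    simp only [PySem.List.enumerate, List.flatMap_cons]
    have hslice : PySem.List.slice (pre ++ x :: t) (some ((pre.length : Int) + 1)) none = t := by
      have hs := PySem.List.slice_from (pre ++ x :: t) (a := (pre.length : Int) + 1) (by omega)
      rw [hs]
      have h1 : ((pre.length : Int) + 1).toNat = (pre ++ [x]).length := by simp
      have h2' : pre ++ x :: t = (pre ++ [x]) ++ t := by simp
      rw [h1, h2', List.drop_left]
    rw [hslice]
    have h2 : List.flatMap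
        (fun ai => List.map (fun j => (ai.2, j)) (PySem.List.slice (pre ++ x :: t) (some (ai.1 + 1))))
        (PySem.List.enumerate t ((pre.length : Int) + 1)) = pvPairs t := by
      have h3 := ih (pre ++ [x])
      simp only [List.length_append, List.length_cons, List.length_nil, Nat.cast_add, Nat.cast_one,
        Nat.cast_zero, List.append_assoc, List.cons_append, List.nil_append, zero_add] at h3
      exact h3
    rw [pvPairs, ← h2]

def pvFacts (s : String) : List String := (PySem.Str.split? s ",").getD []

def pvL (suspects : List String) : List (String × Int) :=
  (PySem.List.enumerate suspects).flatMap
    (fun p => (PySem.List.dedup (pvFacts p.2)).map (fun fact => (fact, p.1)))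

def pvOwners (suspects : List String) (f : String) : List Int :=
  ((pvL suspects).filter (fun q => q.1 == f)).map (fun q => q.2)

def pvFactsSet (suspects : List String) : List String :=
  PySem.Set.ofList ((pvL suspects).map (fun q => q.1))

theorem pv_enum_ge {α : Type} (xs : List α) (s : Int) :
    ∀ p ∈ PySem.List.enumerate xs s, s ≤ p.1 := by
  induction xs generalizing s with
  | nil => simp [PySem.List.enumerate]
  | cons x t ih =>
    intro p hp
    simp only [PySem.List.enumerate, List.mem_cons] at hp
    rcases hp with h | h
    · subst h; simp
    · have := ih (s + 1) p h; omega

theorem pv_enum_pairwise {α : Type} (xs : List α) (s : Int) :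
    (PySem.List.enumerate xs s).Pairwise (fun p q => p.1 < q.1) := by
  induction xs generalizing s with
  | nil => simp [PySem.List.enumerate]
  | cons x t ih =>
    simp only [PySem.List.enumerate]
    exact List.Pairwise.cons (fun q hq => by have := pv_enum_ge t (s+1) q hq; simp; omega) (ih (s+1))

theorem pv_mem_enum {α : Type} (xs : List α) (s : Int) (p : Int × α) :
    p ∈ PySem.List.enumerate xs s ↔ ∃ (k : Nat) (h : k < xs.length), p = (s + (k : Int), xs[k]) := by
  induction xs generalizing s with
  | nil => simp [PySem.List.enumerate]
  | cons x t ih =>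
    simp only [PySem.List.enumerate, List.mem_cons, ih (s+1)]
    constructor
    · rintro (h | ⟨k, hk, h⟩)
      · exact ⟨0, by simp, by simpa using h⟩
      · exact ⟨k+1, by simpa using hk, by simp [h]; ring_nf⟩
    · rintro ⟨k, hk, h⟩
      cases k with
      | zero => left; simpa using h
      | succ k => right; exact ⟨k, by simpa using hk, by simp [h]; ring_nf⟩

theorem pv_mem_owners (suspects : List String) (f : String) (i : Int) :
    i ∈ pvOwners suspects f ↔ ∃ (k : Nat) (h : k < suspects.length), i = (k : Int) ∧ f ∈ pvFacts suspects[k] := by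
  simp only [pvOwners, List.mem_map, List.mem_filter, pvL, List.mem_flatMap, beq_iff_eq]
  constructor
  · rintro ⟨q, ⟨⟨p, hp, hq⟩, hqf⟩, hqi⟩
    rcases (pv_mem_enum suspects 0 p).mp hp with ⟨k, hk, rfl⟩
    simp only [List.mem_map] at hq
    rcases hq with ⟨fact, hfact, rfl⟩
    refine ⟨k, hk, by simpa using hqi.symm, ?_⟩
    subst hqf
    simpa [PySem.List.mem_dedup] using hfact
  · rintro ⟨k, hk, rfl, hf⟩
    refine ⟨(f, (k : Int)), ⟨⟨((k : Int), suspects[k]), ?_, ?_⟩, rfl⟩, rfl⟩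
    · exact (pv_mem_enum suspects 0 _).mpr ⟨k, hk, by simp⟩
    · simp [PySem.List.mem_dedup, hf]

theorem pv_mem_facts (suspects : List String) (f : String) :
    f ∈ pvFactsSet suspects ↔ ∃ (k : Nat) (h : k < suspects.length), f ∈ pvFacts suspects[k] := by
  simp only [pvFactsSet, PySem.Set.mem_ofList, List.mem_map, pvL, List.mem_flatMap]
  constructor
  · rintro ⟨q, ⟨p, hp, hq⟩, rfl⟩
    rcases (pv_mem_enum suspects 0 p).mp hp with ⟨k, hk, rfl⟩
    simp only [List.mem_map] at hq
    rcases hq with ⟨fact, hfact, rfl⟩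
    exact ⟨k, hk, by simpa [PySem.List.mem_dedup] using hfact⟩
  · rintro ⟨k, hk, hf⟩
    refine ⟨(f, (k : Int)), ⟨((k : Int), suspects[k]), ?_, ?_⟩, rfl⟩
    · exact (pv_mem_enum suspects 0 _).mpr ⟨k, hk, by simp⟩
    · simp [PySem.List.mem_dedup, hf]

theorem pv_owners_sorted (suspects : List String) (f : String) :
    (pvOwners suspects f).Pairwise (· < ·) := by
  have hL : (pvL suspects).Pairwise (fun q q' => q.2 < q'.2 ∨ q.1 ≠ q'.1) := by
    rw [pvL, List.pairwise_flatMap]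
    constructor
    · intro p hp
      rw [List.pairwise_map]
      have hnd := PySem.List.nodup_dedup (pvFacts p.2)
      exact hnd.imp (fun hab => Or.inr (by simpa using hab))
    · have hpw := pv_enum_pairwise suspects 0
      refine hpw.imp ?_
      rintro ⟨a1, a2⟩ ⟨b1, b2⟩ hlt x hx y hy
      simp only [List.mem_map] at hx hy
      rcases hx with ⟨_, _, rfl⟩
      rcases hy with ⟨_, _, rfl⟩
      exact Or.inl hlt
  rw [pvOwners, List.pairwise_map]
  have := hL.filter (fun q => q.1 == f)
  refine this.imp_of_mem ?_
  intro a b ha hb hab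
  rcases hab with h | h
  · exact h
  · exfalso
    rw [List.mem_filter] at ha hb
    exact h (by rw [beq_iff_eq] at *; rw [ha.2, hb.2])

def pvK (suspects : List String) : List (Int × Int) :=
  (pvFactsSet suspects).flatMap (fun f => pvPairs (pvOwners suspects f))

def pvInter (suspects : List String) (x y : Int) : Int :=
  ((PySem.Set.inter
      (PySem.Set.ofList (PySem.List.pyGetD (suspects.map pvFacts) x []))
      (PySem.Set.ofList (PySem.List.pyGetD (suspects.map pvFacts) y []))).length : Int)

theorem pv_sum_ite {α : Type} (l : List α) (p : α → Bool) :
    (l.map (fun x => if p x then (1 : Nat) else 0)).sum = l.countP p := by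
  induction l with
  | nil => simp
  | cons x t ih => by_cases h : p x <;> simp [h, ih] <;> omega

theorem pv_count_K (suspects : List String) (i j : Int) (hij : i < j) :
    (pvK suspects).count (i, j)
      = (pvFactsSet suspects).countP
          (fun f => decide (i ∈ pvOwners suspects f) && decide (j ∈ pvOwners suspects f)) := by
  rw [pvK, List.count_flatMap]
  have hmap : (List.map (List.count (i, j) ∘ fun f => pvPairs (pvOwners suspects f)) (pvFactsSet suspects))
      = (pvFactsSet suspects).map
          (fun f => if (decide (i ∈ pvOwners suspects f) && decide (j ∈ pvOwners suspects f) : Bool)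
                    then 1 else 0) := by
    apply List.map_congr_left
    intro f _
    simp only [Function.comp_apply]
    rw [pv_pairs_count _ (pv_owners_sorted suspects f)]
    by_cases h1 : i ∈ pvOwners suspects f <;> by_cases h2 : j ∈ pvOwners suspects f <;>
      simp [h1, h2, hij]
  rw [hmap, pv_sum_ite]

theorem pv_memK_bounds (suspects : List String) (k : Int × Int) (hk : k ∈ pvK suspects) :
    0 ≤ k.1 ∧ k.1 < k.2 ∧ k.2 < (suspects.length : Int) := by
  rw [pvK, List.mem_flatMap] at hk
  rcases hk with ⟨f, _, hkf⟩
  obtain ⟨ki, kj⟩ := k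
  rw [pv_mem_pairs _ (pv_owners_sorted suspects f)] at hkf
  rcases hkf with ⟨hi, hj, hlt⟩
  rcases (pv_mem_owners suspects f ki).mp hi with ⟨a, ha, rfl, _⟩
  rcases (pv_mem_owners suspects f kj).mp hj with ⟨b, hb, rfl, _⟩
  exact ⟨by positivity, hlt, by simp; exact_mod_cast hb⟩

theorem pv_memK_of_mem (suspects : List String) (f : String) (i j : Int)
    (hf : f ∈ pvFactsSet suspects) (hi : i ∈ pvOwners suspects f) (hj : j ∈ pvOwners suspects f)
    (hij : i < j) : (i, j) ∈ pvK suspects := by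
  rw [pvK, List.mem_flatMap]
  exact ⟨f, hf, (pv_mem_pairs _ (pv_owners_sorted suspects f) i j).mpr ⟨hi, hj, hij⟩⟩

theorem pv_countP_inter (suspects : List String) (i j : Int)
    (hi : 0 ≤ i) (hij : i < j) (hj : j < (suspects.length : Int)) :
    (((pvFactsSet suspects).countP
        (fun f => decide (i ∈ pvOwners suspects f) && decide (j ∈ pvOwners suspects f))) : Int)
      = pvInter suspects i j := by
  obtain ⟨a, rfl⟩ : ∃ a : Nat, i = (a : Int) := ⟨i.toNat, (Int.toNat_of_nonneg hi).symm⟩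
  obtain ⟨b, rfl⟩ : ∃ b : Nat, j = (b : Int) := ⟨j.toNat, (Int.toNat_of_nonneg (by omega)).symm⟩
  have hb : b < suspects.length := by exact_mod_cast hj
  have ha : a < suspects.length := by
    have : (a : Int) < (suspects.length : Int) := lt_trans hij hj
    exact_mod_cast this
  rw [pvInter, PySem.List.pyGetD_natCast, PySem.List.pyGetD_natCast]
  have hga : (suspects.map pvFacts).getD a [] = pvFacts suspects[a] := by
    rw [List.getD_eq_getElem _ _ (by simpa using ha)]; simp
  have hgb : (suspects.map pvFacts).getD b [] = pvFacts suspects[b] := by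
    rw [List.getD_eq_getElem _ _ (by simpa using hb)]; simp
  rw [hga, hgb, List.countP_eq_length_filter]
  have hperm : ((pvFactsSet suspects).filter
      (fun f => decide ((a : Int) ∈ pvOwners suspects f) && decide ((b : Int) ∈ pvOwners suspects f))).Perm
      (PySem.Set.inter (PySem.Set.ofList (pvFacts suspects[a])) (PySem.Set.ofList (pvFacts suspects[b]))) := by
    have hnd1 : ((pvFactsSet suspects).filter
        (fun f => decide ((a : Int) ∈ pvOwners suspects f) && decide ((b : Int) ∈ pvOwners suspects f))).Nodup :=
      List.Nodup.filter _ (by rw [pvFactsSet]; exact PySem.Set.nodup_ofList _)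
    have hnd2 : (PySem.Set.inter (PySem.Set.ofList (pvFacts suspects[a]))
        (PySem.Set.ofList (pvFacts suspects[b]))).Nodup :=
      PySem.Set.nodup_inter _ _ (PySem.Set.nodup_ofList _)
    rw [List.perm_ext_iff_of_nodup hnd1 hnd2]
    intro f
    rw [List.mem_filter, PySem.Set.mem_inter, PySem.Set.mem_ofList, PySem.Set.mem_ofList]
    simp only [Bool.and_eq_true, decide_eq_true_eq]
    constructor
    · rintro ⟨_, hoa, hob⟩
      rcases (pv_mem_owners suspects f _).mp hoa with ⟨k, hk, hak, hfk⟩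
      rcases (pv_mem_owners suspects f _).mp hob with ⟨k', hk', hbk, hfk'⟩
      have : k = a := by exact_mod_cast hak.symm
      subst this
      have : k' = b := by exact_mod_cast hbk.symm
      subst this
      exact ⟨hfk, hfk'⟩
    · rintro ⟨hfa, hfb⟩
      exact ⟨(pv_mem_facts suspects f).mpr ⟨a, ha, hfa⟩,
        (pv_mem_owners suspects f _).mpr ⟨a, ha, rfl, hfa⟩,
        (pv_mem_owners suspects f _).mpr ⟨b, hb, rfl, hfb⟩⟩
  rw [hperm.length_eq]

theorem pv_memK_of_inter_pos (suspects : List String) (i j : Int)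
    (hi : 0 ≤ i) (hij : i < j) (hj : j < (suspects.length : Int))
    (hpos : 0 < pvInter suspects i j) : (i, j) ∈ pvK suspects := by
  have h := pv_countP_inter suspects i j hi hij hj
  rw [← h] at hpos
  have : 0 < (pvFactsSet suspects).countP
      (fun f => decide (i ∈ pvOwners suspects f) && decide (j ∈ pvOwners suspects f)) := by
    exact_mod_cast hpos
  rw [List.countP_pos_iff] at this
  rcases this with ⟨f, hf, hpred⟩
  simp only [Bool.and_eq_true, decide_eq_true_eq] at hpred
  exact pv_memK_of_mem suspects f i j hf hpred.1 hpred.2 hij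

def pvLA (suspects : List String) : List Int :=
  (PySem.List.pyRange 0 (suspects.length : Int) 1).flatMap
    (fun x => (PySem.List.pyRange (x + 1) (suspects.length : Int) 1).map
      (fun y => pvInter suspects x y))

def pvVB (suspects : List String) : List Int :=
  (PySem.Set.ofList (pvK suspects)).map (fun k => ((pvK suspects).count k : Int))

theorem pv_if_max (a v : Int) : (if v > a then v else a) = max a v := by
  rw [max_def]; split_ifs <;> omega

theorem pv_A_eq (suspects : List String) :
    maximumFacts suspects = (pvLA suspects).foldl max 0 := by
  unfold maximumFacts
  rw [PySem.List.foldl_append_singleton_eq_map]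
  simp only [List.nil_append, List.length_map]
  rw [pvLA, List.foldl_flatMap]
  simp only [List.foldl_map, pv_if_max, pvInter, pvFacts]
  rfl

theorem pv_kf0 (idx : List Int) :
    (PySem.List.enumerate idx).flatMap
      (fun ai => (PySem.List.slice idx (some (ai.1 + 1)) none).map (fun j => (ai.2, j)))
      = pvPairs idx := by
  have h := pv_kf idx []
  simpa using h

theorem pv_maxD_foldl (xs : List Int) (h : ∀ x ∈ xs, 0 ≤ x) :
    PySem.List.maxD xs (fun v => v) 0 = xs.foldl max 0 := by
  cases xs with
  | nil => rfl
  | cons x t =>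
    rw [PySem.List.maxD, PySem.List.max?_id_cons, Option.getD_some, List.foldl_cons,
      max_eq_right (h x (List.mem_cons_self))]

theorem pv_B_eq (suspects : List String) :
    maximumFacts_alt suspects = (pvVB suspects).foldl max 0 := by
  have hinline : maximumFacts_alt suspects =
      PySem.List.maxD
        ((((PySem.List.enumerate suspects).foldl (fun d p =>
            (PySem.List.dedup ((PySem.Str.split? p.2 ",").getD [])).foldl
              (fun d fact => d.modify fact [] (fun v => v ++ [p.1])) d) PySem.Dict.empty).values.foldl
          (fun sh idx =>
            (PySem.List.enumerate idx).foldl (fun sh ai =>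
              (PySem.List.slice idx (some (ai.1 + 1)) none).foldl (fun sh j =>
                sh.insert (ai.2, j) (sh.getD (ai.2, j) 0 + 1)) sh) sh) PySem.Dict.empty).values)
        (fun v => v) 0 := rfl
  rw [hinline]
  have hO : (PySem.List.enumerate suspects).foldl (fun d p =>
      (PySem.List.dedup ((PySem.Str.split? p.2 ",").getD [])).foldl
        (fun d fact => d.modify fact [] (fun v => v ++ [p.1])) d) PySem.Dict.empty
      = (pvL suspects).foldl (fun d q => d.modify q.1 [] (fun v => v ++ [q.2])) PySem.Dict.empty := by
    rw [pvL, List.foldl_flatMap]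
    simp only [List.foldl_map, pvFacts]
  rw [hO]
  set O := (pvL suspects).foldl (fun d q => d.modify q.1 [] (fun v => v ++ [q.2])) PySem.Dict.empty with hOdef
  have hOget : ∀ f, O.getD f [] = pvOwners suspects f := by
    intro f
    rw [hOdef, PySem.Dict.getD_foldl_modify_append, PySem.Dict.getD_empty, List.nil_append, pvOwners]
  have hOkeys : O.keys = pvFactsSet suspects := by
    rw [hOdef, PySem.Dict.keys_foldl_modify_key, PySem.Dict.keys_empty,
      PySem.Set.update_nil_left, pvFactsSet]
  have hOnodup : O.keys.Nodup := by
    rw [hOkeys, pvFactsSet]; exact PySem.Set.nodup_ofList _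
  have hOvalues : O.values = (pvFactsSet suspects).map (pvOwners suspects) := by
    rw [PySem.Dict.values, PySem.Dict.items_eq_map_keys O hOnodup [], List.map_map]
    rw [hOkeys]
    apply List.map_congr_left
    intro f _
    simpa using hOget f
  rw [hOvalues]
  have hK : ((pvFactsSet suspects).map (pvOwners suspects)).foldl (fun sh idx =>
      (PySem.List.enumerate idx).foldl (fun sh ai =>
        (PySem.List.slice idx (some (ai.1 + 1)) none).foldl (fun sh j =>
          sh.insert (ai.2, j) (sh.getD (ai.2, j) 0 + 1)) sh) sh) (PySem.Dict.empty : PySem.Dict (Int × Int) Int)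
      = (pvK suspects).foldl (fun sh k => sh.insert k (sh.getD k 0 + 1)) (PySem.Dict.empty : PySem.Dict (Int × Int) Int) := by
    rw [pvK, List.foldl_map, List.foldl_flatMap]
    apply PySem.List.foldl_congr_mem
    intro acc f hf
    rw [← pv_kf0 (pvOwners suspects f), List.foldl_flatMap]
    simp only [List.foldl_map]
  rw [hK]
  set S := (pvK suspects).foldl (fun sh k => sh.insert k (sh.getD k 0 + 1)) (PySem.Dict.empty : PySem.Dict (Int × Int) Int) with hSdef
  have hSget : ∀ k, S.getD k 0 = ((pvK suspects).count k : Int) := by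
    intro k
    rw [hSdef, PySem.Dict.getD_foldl_insert_add_one, PySem.Dict.getD_empty, zero_add]
  have hSkeys : S.keys = PySem.Set.ofList (pvK suspects) := by
    rw [hSdef, PySem.Dict.keys_foldl_insert, PySem.Dict.keys_empty, PySem.Set.update_nil_left]
  have hSnodup : S.keys.Nodup := by
    rw [hSkeys]; exact PySem.Set.nodup_ofList _
  have hSvalues : S.values = pvVB suspects := by
    rw [PySem.Dict.values, PySem.Dict.items_eq_map_keys S hSnodup 0, List.map_map, hSkeys, pvVB]
    apply List.map_congr_left
    intro k _
    simpa using hSget k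
  rw [hSvalues]
  apply pv_maxD_foldl
  intro x hx
  rw [pvVB] at hx
  rcases List.mem_map.mp hx with ⟨k, _, rfl⟩
  positivity

theorem pv_count_inter (suspects : List String) (i j : Int)
    (hi : 0 ≤ i) (hij : i < j) (hj : j < (suspects.length : Int)) :
    (((pvK suspects).count (i, j)) : Int) = pvInter suspects i j := by
  rw [pv_count_K suspects i j hij]
  exact pv_countP_inter suspects i j hi hij hj

theorem pv_final (suspects : List String) :
    (pvLA suspects).foldl max 0 = (pvVB suspects).foldl max 0 := by
  have hInter_nonneg : ∀ x y, 0 ≤ pvInter suspects x y := by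
    intro x y; rw [pvInter]; positivity
  have hLA_le : ∀ v ∈ pvLA suspects, v ≤ (pvVB suspects).foldl max 0 := by
    intro v hv
    rw [pvLA, List.mem_flatMap] at hv
    rcases hv with ⟨x, hx, hv⟩
    rcases List.mem_map.mp hv with ⟨y, hy, rfl⟩
    rw [PySem.List.mem_pyRange_one] at hx hy
    by_cases hvz : pvInter suspects x y ≤ 0
    · exact le_trans hvz (PySem.List.le_foldl_max (pvVB suspects) 0).1
    · push_neg at hvz
      have hmem : (x, y) ∈ pvK suspects :=
        pv_memK_of_inter_pos suspects x y hx.1 (by omega) hy.2 hvz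
      have hvb : (((pvK suspects).count (x, y)) : Int) ∈ pvVB suspects := by
        rw [pvVB]
        exact List.mem_map_of_mem ((PySem.Set.mem_ofList _ _).mpr hmem)
      have := (PySem.List.le_foldl_max (pvVB suspects) 0).2 _ hvb
      rwa [pv_count_inter suspects x y hx.1 (by omega) hy.2] at this
  have hVB_le : ∀ v ∈ pvVB suspects, v ≤ (pvLA suspects).foldl max 0 := by
    intro v hv
    rw [pvVB] at hv
    rcases List.mem_map.mp hv with ⟨k, hk, rfl⟩
    have hkK : k ∈ pvK suspects := (PySem.Set.mem_ofList _ _).mp hk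
    obtain ⟨ki, kj⟩ := k
    rcases pv_memK_bounds suspects (ki, kj) hkK with ⟨h1, h2, h3⟩
    simp only at h1 h2 h3
    have hla : pvInter suspects ki kj ∈ pvLA suspects := by
      rw [pvLA, List.mem_flatMap]
      refine ⟨ki, PySem.List.mem_pyRange_one.mpr ⟨h1, by omega⟩, ?_⟩
      exact List.mem_map_of_mem (PySem.List.mem_pyRange_one.mpr ⟨by omega, h3⟩)
    have := (PySem.List.le_foldl_max (pvLA suspects) 0).2 _ hla
    rwa [← pv_count_inter suspects ki kj h1 h2 h3] at this
  apply le_antisymm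
  · rcases PySem.List.foldl_max_mem (pvLA suspects) (0 : Int) with h0 | hm
    · rw [h0]; exact (PySem.List.le_foldl_max (pvVB suspects) 0).1
    · exact hLA_le _ hm
  · rcases PySem.List.foldl_max_mem (pvVB suspects) (0 : Int) with h0 | hm
    · rw [h0]; exact (PySem.List.le_foldl_max (pvLA suspects) 0).1
    · exact hVB_le _ hm

-- ===== VERDICT (by name: the statement is the Claim_ definition above) =====
theorem maximumFacts_spec : Claim_equal_maximumFacts := by
  intro suspects _
  unfold Spec_maximumFacts
  rw [pv_A_eq, pv_B_eq]
  exact pv_final suspects
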